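-- pv_equiv track=rewrite | github.com/majoporse/uni | ib111/midterm1.py | largest_elf_island
-- ===== SOURCE A (Python) =====
-- def largest_elf_island(num):
--     my_num = num
--     biggest_island = 0
--     current_island = 0
--     position = 0
--     biggest_position = 0
--     while my_num > 0:
--
--         if my_num % 11 == 10:
--             current_island += 1
--
--         if biggest_island < current_island:
--             biggest_island = current_island
--             biggest_position = position - biggest_island + 1
--
--         if my_num % 11 != 10:
--             current_island = 0
--
-- #         my_num -= my_num % 11
--         my_num //= 11
--
--         position += 1
--
--     return (biggest_position, biggest_island)
-- ===== SOURCE B (Python) =====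
-- def _step(d, r):
--     """Combine digit d (at position 0) with the child's triple r = (lead, bpos, blen)."""
--     lead, bpos, blen = r
--     if d != 10:
--         return (0, bpos + 1, blen) if blen > 0 else (0, 0, 0)
--     lead += 1
--     if lead >= blen:
--         return (lead, 0, lead)
--     return (lead, bpos + 1, blen)
--
-- def _rec(n):
--     """Post-order recursion on the base-11 digits of n (LSB = position 0):
--     returns (leading run of 10-digits, best-run start, best-run length)."""
--     if n <= 0:
--         return (0, 0, 0)
--     return _step(n % 11, _rec(n // 11))
--
-- def largest_elf_island(num):
--     _lead, bpos, blen = _rec(num)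
--     return (bpos, blen)
-- ===== Notes on version B (the rewrite author's own statement) =====
-- stated objective: alternative
-- what changed: B replaces A's forward while-loop threading mutable current/best accumulators by a post-order structural recursion that returns, for each number, the triple (leading run of 10-digits, best start, best length) and combines the current digit with the child's result on the way back up.
import Mathlib
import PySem

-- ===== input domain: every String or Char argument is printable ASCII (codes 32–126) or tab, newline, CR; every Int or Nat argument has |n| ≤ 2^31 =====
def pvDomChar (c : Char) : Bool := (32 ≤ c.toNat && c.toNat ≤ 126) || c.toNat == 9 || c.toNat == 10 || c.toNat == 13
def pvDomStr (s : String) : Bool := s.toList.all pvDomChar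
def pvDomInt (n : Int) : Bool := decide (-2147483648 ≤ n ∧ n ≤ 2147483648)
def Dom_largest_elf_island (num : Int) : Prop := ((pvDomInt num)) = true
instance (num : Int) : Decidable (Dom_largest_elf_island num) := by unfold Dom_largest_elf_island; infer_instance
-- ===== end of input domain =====

-- B is a post-order structural recursion on the base-11 digits returning (leading run, best start, best length),
-- instead of A's forward accumulator loop; same cost, different decomposition.
-- ===== PORT A =====
-- A's while-loop, state = (biggest_island, current_island, position, biggest_position)
def pvALoop (my_num biggest_island current_island position biggest_position : Int) : Int × Int :=
  if h : my_num > 0 then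
    let current_island := if PySem.Int.mod my_num 11 = 10 then current_island + 1 else current_island
    let biggest_island' := if biggest_island < current_island then current_island else biggest_island
    let biggest_position := if biggest_island < current_island then position - current_island + 1 else biggest_position
    let current_island := if PySem.Int.mod my_num 11 ≠ 10 then 0 else current_island
    pvALoop (PySem.Int.floordiv my_num 11) biggest_island' current_island (position + 1) biggest_position
  else (biggest_position, biggest_island)
termination_by my_num.toNat
decreasing_by
  have h11 : (0:Int) < 11 := by norm_num
  rw [PySem.Int.floordiv_eq_ediv_of_pos h11]
  omega

def largest_elf_island (num : Int) : Int × Int :=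
  pvALoop num 0 0 0 0

-- ===== PORT B =====
-- B's helper _rec: post-order recursion, returns (leading run of 10-digits, best start, best length)
def pvRecStep (d : Int) (r : Int × Int × Int) : Int × Int × Int :=
  let lead := r.1
  let bpos := r.2.1
  let blen := r.2.2
  if d ≠ 10 then
    if blen > 0 then (0, bpos + 1, blen) else (0, 0, 0)
  else
    if lead + 1 ≥ blen then (lead + 1, 0, lead + 1) else (lead + 1, bpos + 1, blen)

def pvRec (n : Int) : Int × Int × Int :=
  if _h : n > 0 then
    pvRecStep (PySem.Int.mod n 11) (pvRec (PySem.Int.floordiv n 11))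
  else (0, 0, 0)
termination_by n.toNat
decreasing_by
  have h11 : (0:Int) < 11 := by norm_num
  rw [PySem.Int.floordiv_eq_ediv_of_pos h11]
  omega

def largest_elf_island_alt (num : Int) : Int × Int :=
  ((pvRec num).2.1, (pvRec num).2.2)

-- ===== PRECONDITION & SPEC =====
def Spec_largest_elf_island (num : Int) (out : Int × Int) : Prop := out = largest_elf_island_alt num
instance (num : Int) (out : Int × Int) : Decidable (Spec_largest_elf_island num out) := by unfold Spec_largest_elf_island; infer_instance

-- ===== CLAIM (what is proved, stated in full; the proofs are below) =====
def Claim_equal_largest_elf_island : Prop := ∀ (num : Int), Dom_largest_elf_island num → Spec_largest_elf_island num (largest_elf_island num)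

-- ===== LEMMAS AND PROOFS =====
-- how a child's recursion result combines with the incoming loop state of A
def pvCombine (r : Int × Int × Int) (best cur pos bpos : Int) : Int × Int :=
  if best ≥ cur + r.1 ∧ best ≥ r.2.2 then (bpos, best)
  else if cur + r.1 ≥ r.2.2 then (pos - cur, cur + r.1)
  else (pos + r.2.1, r.2.2)

-- invariants of pvRec: 0 ≤ lead ≤ blen, and if the leading run is the best one then its start is 0
theorem pvRec_inv (n : Int) :
    0 ≤ (pvRec n).1 ∧ (pvRec n).1 ≤ (pvRec n).2.2 ∧ ((pvRec n).2.2 ≤ (pvRec n).1 → (pvRec n).2.1 = 0) := by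
  induction n using pvRec.induct with
  | case1 n hn ih =>
    rw [pvRec]
    simp only [hn, dif_pos]
    obtain ⟨h1, h2, h3⟩ := ih
    rcases hr : pvRec (PySem.Int.floordiv n 11) with ⟨lead, bp, bl⟩
    rw [hr] at h1 h2 h3
    simp only at h1 h2 h3
    simp only [pvRecStep]
    split_ifs <;> simp_all <;> omega
  | case2 n hn =>
    rw [pvRec]
    simp [hn]

set_option maxHeartbeats 1000000 in
theorem pvLoop_eq_combine (n : Int) : ∀ best cur pos bpos : Int, 0 ≤ cur → cur ≤ best →
    pvALoop n best cur pos bpos = pvCombine (pvRec n) best cur pos bpos := by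
  induction n using pvRec.induct with
  | case2 n hn =>
    intro best cur pos bpos hc hcb
    rw [pvALoop, pvRec]
    simp only [hn, dif_neg, not_false_iff]
    unfold pvCombine
    rw [if_pos (by constructor <;> simp <;> omega)]
  | case1 n hn ih =>
    intro best cur pos bpos hc hcb
    obtain ⟨h1, h2, h3⟩ := pvRec_inv (PySem.Int.floordiv n 11)
    rw [pvALoop, pvRec]
    simp only [hn, dif_pos]
    rcases hr : pvRec (PySem.Int.floordiv n 11) with ⟨lead, bp, bl⟩
    rw [hr] at h1 h2 h3
    simp only at h1 h2 h3
    have hbp : bp = 0 ∨ lead < bl := Or.imp h3 id (by omega : bl ≤ lead ∨ lead < bl)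
    by_cases hd : PySem.Int.mod n 11 = 10
    · -- digit is 10: cur increments
      by_cases hb : best < cur + 1
      · have hrec := ih (cur + 1) (cur + 1) (pos + 1) (pos - (cur + 1) + 1) (by omega) le_rfl
        rw [hr] at hrec
        simp only [hd, hb, if_true, if_false, ne_eq, not_true_eq_false, ite_true, ite_false, not_false_eq_true]
        rw [hrec]
        simp only [pvCombine, pvRecStep]
        split_ifs <;> dsimp only at * <;> first | rfl | (exfalso; omega) | ((simp only [Prod.mk.injEq, and_true, true_and]) <;> omega)
      · have hrec := ih best (cur + 1) (pos + 1) bpos (by omega) (by omega)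
        rw [hr] at hrec
        simp only [hd, hb, if_true, if_false, ne_eq, not_true_eq_false, ite_true, ite_false, not_false_eq_true]
        rw [hrec]
        simp only [pvCombine, pvRecStep]
        split_ifs <;> dsimp only at * <;> first | rfl | (exfalso; omega) | ((simp only [Prod.mk.injEq, and_true, true_and]) <;> omega)
    · -- digit is not 10: cur resets to 0; best unchanged since cur ≤ best
      have hlt : ¬ best < cur := by omega
      have hrec := ih best 0 (pos + 1) bpos le_rfl (by omega)
      rw [hr] at hrec
      simp only [hd, hlt, if_true, if_false, ne_eq, not_false_eq_true, ite_true, ite_false]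
      rw [hrec]
      simp only [pvCombine, pvRecStep]
      split_ifs <;> dsimp only at * <;> first | rfl | (exfalso; omega) | ((simp only [Prod.mk.injEq, and_true, true_and]) <;> omega)

-- ===== VERDICT (by name: the statement is the Claim_ definition above) =====
theorem largest_elf_island_spec : Claim_equal_largest_elf_island := by
  intro num _
  unfold Spec_largest_elf_island largest_elf_island largest_elf_island_alt
  obtain ⟨h1, h2, h3⟩ := pvRec_inv num
  rw [pvLoop_eq_combine num 0 0 0 0 le_rfl le_rfl]
  unfold pvCombine
  rcases hr : pvRec num with ⟨lead, bp, bl⟩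
  rw [hr] at h1 h2 h3
  simp only at h1 h2 h3
  split_ifs <;> dsimp only at * <;> first | rfl | (exfalso; omega) | ((simp only [Prod.mk.injEq, and_true, true_and]) <;> omega)
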